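-- pv_equiv track=rewrite | github.com/bangoga/LeetCode-Interviews | String Solutions/ValidBrackets.py | recursizeSolution
-- ===== SOURCE A (Python) =====
-- def recursizeSolution(s,bracks,valids,index):
--     if(len(s)==0):
--         return valids
--
--     # if its an opening, insert the openings index
--     if(s[0] == "("):
--         bracks.append(index)
--
--     # if its a closing,check if there is a opening available, if so, add 1 to both their positions to mark
--     if(s[0] == ")" and len(bracks)>0):
--
--             #remove the last bracket
--             open_i = bracks[len(bracks)-1] # get the opening index
--             close_i = index
--
--             bracks = bracks[:len(bracks)-1]
--
--             valids[open_i]=1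
--             valids[close_i]=1
--
--     index=index+1
--     return recursizeSolution(s[1:len(s)],bracks,valids,index)
-- ===== SOURCE B (Python) =====
-- # Single left-to-right pass with a stack of opening indices: no string slicing,
-- # no recursion.  NOTE: A mutates bracks/valids in place; B leaves its arguments
-- # untouched and only the RETURN value is claimed equal.
-- def recursizeSolution(s, bracks, valids, index):
--     stack = list(bracks)
--     out = list(valids)
--     for j, c in enumerate(s):
--         if c == "(":
--             stack.append(index + j)
--         elif c == ")" and stack:
--             out[stack.pop()] = 1
--             out[index + j] = 1
--     return out
-- ===== Notes on version B (the rewrite author's own statement) =====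
-- stated objective: faster
-- what changed: Replaces the O(n^2) recursion that re-slices the string and the bracket list at every character by one iterative pass over enumerate(s) keeping a stack of opening indices.
import Mathlib
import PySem

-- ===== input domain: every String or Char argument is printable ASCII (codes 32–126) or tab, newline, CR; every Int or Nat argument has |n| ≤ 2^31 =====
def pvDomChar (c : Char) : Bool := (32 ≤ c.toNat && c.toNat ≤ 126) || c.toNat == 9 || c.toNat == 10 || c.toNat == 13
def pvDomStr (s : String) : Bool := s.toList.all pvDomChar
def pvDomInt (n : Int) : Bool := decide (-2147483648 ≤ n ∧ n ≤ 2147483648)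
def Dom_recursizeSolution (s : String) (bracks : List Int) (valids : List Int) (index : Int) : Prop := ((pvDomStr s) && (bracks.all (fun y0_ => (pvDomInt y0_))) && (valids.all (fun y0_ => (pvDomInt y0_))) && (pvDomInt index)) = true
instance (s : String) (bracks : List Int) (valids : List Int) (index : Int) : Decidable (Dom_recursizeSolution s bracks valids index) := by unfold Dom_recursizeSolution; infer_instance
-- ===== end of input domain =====

-- B replaces A's recursion-with-slicing by one iterative pass with a stack of
-- opening indices (asymptotically faster).  A mutates bracks/valids in place;
-- only the RETURN value is claimed equal here.

-- ===== PORT A =====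
-- A recurses on s[1:]; the wrapper converts the string to its char list once
-- and the helper recurses structurally (tail = s[1:len(s)], head = s[0]).
def pvGoA : List Char → List Int → List Int → Int → List Int
  | [], _, valids, _ => valids
  | c :: rest, bracks, valids, index =>
    let bracks1 := if c = '(' then bracks ++ [index] else bracks
    if c = ')' ∧ bracks1.length > 0 then
      let open_i := PySem.List.pyGetD bracks1 ((bracks1.length : Int) - 1) 0
      let close_i := index
      let bracks2 := PySem.List.slice bracks1 none (some ((bracks1.length : Int) - 1))
      let valids1 := PySem.List.pySetD valids open_i 1
      let valids2 := PySem.List.pySetD valids1 close_i 1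
      pvGoA rest bracks2 valids2 (index + 1)
    else
      pvGoA rest bracks1 valids (index + 1)

def recursizeSolution (s : String) (bracks : List Int) (valids : List Int) (index : Int) : List Int :=
  pvGoA s.toList bracks valids index

-- ===== PORT B =====
-- one fold over enumerate(s); state = (stack of opening indices, out array)
def pvStepB (index : Int) (st : List Int × List Int) (jc : Int × Char) : List Int × List Int :=
  if jc.2 = '(' then (st.1 ++ [index + jc.1], st.2)
  else if jc.2 = ')' ∧ st.1 ≠ [] then
    match PySem.List.pop? st.1 (-1) with
    | some (top, stack') =>
        (stack', PySem.List.pySetD (PySem.List.pySetD st.2 top 1) (index + jc.1) 1)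
    | none => st  -- unreachable: guarded by st.1 ≠ []
  else st

def recursizeSolution_alt (s : String) (bracks : List Int) (valids : List Int) (index : Int) : List Int :=
  ((PySem.List.enumerate s.toList 0).foldl (pvStepB index) (bracks, valids)).2

-- ===== PRECONDITION & SPEC =====
-- A raises IndexError when it assigns valids[i] with i out of range.  Pre_
-- characterises the assigned indices in closed form via prefix bracket counts
-- (matched closing positions, the opening positions that get popped, and the
-- popped top part of the initial bracks) and requires exactly those to be
-- valid (possibly negative) indices into valids.
def pvPrefDiff (cs : List Char) (i : Nat) : Int :=
  ((cs.take i).count '(' : Int) - ((cs.take i).count ')' : Int)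
def pvZ (m : Nat) (cs : List Char) (i : Nat) : Int :=
  pvPrefDiff cs i + max (m : Int) (((List.range (i + 1)).map (fun j => -pvPrefDiff cs j)).foldl max 0)
def pvMinZ (m : Nat) (cs : List Char) : Int :=
  ((List.range (cs.length + 1)).map (pvZ m cs)).foldl min (m : Int)
def Pre_recursizeSolution (s : String) (bracks : List Int) (valids : List Int) (index : Int) : Prop :=
  (∀ i < s.toList.length,
      (s.toList.getD i ' ' = ')' → 0 < pvZ bracks.length s.toList i →
         PySem.Raise.InRange valids.length (index + i)) ∧
      (s.toList.getD i ' ' = '(' →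
         (∃ i' < s.toList.length + 1, i < i' ∧
             pvZ bracks.length s.toList i' ≤ pvZ bracks.length s.toList i) →
         PySem.Raise.InRange valids.length (index + i))) ∧
  (∀ h < bracks.length, pvMinZ bracks.length s.toList ≤ (h : Int) →
      PySem.Raise.InRange valids.length (bracks.getD h 0))
instance (s : String) (bracks : List Int) (valids : List Int) (index : Int) : Decidable (Pre_recursizeSolution s bracks valids index) := by unfold Pre_recursizeSolution; infer_instance

def pvWitness_recursizeSolution : String × List Int × List Int × Int := ("(x)", [], [0, 0, 0], 0)

def Spec_recursizeSolution (s : String) (bracks : List Int) (valids : List Int) (index : Int) (out : List Int) : Prop := out = recursizeSolution_alt s bracks valids index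
instance (s : String) (bracks : List Int) (valids : List Int) (index : Int) (out : List Int) : Decidable (Spec_recursizeSolution s bracks valids index out) := by unfold Spec_recursizeSolution; infer_instance

-- ===== CLAIM (what is proved, stated in full; the proofs are below) =====
def Claim_equal_recursizeSolution : Prop := ∀ (s : String) (bracks : List Int) (valids : List Int) (index : Int), Dom_recursizeSolution s bracks valids index → Pre_recursizeSolution s bracks valids index → Spec_recursizeSolution s bracks valids index (recursizeSolution s bracks valids index)

-- ===== LEMMAS AND PROOFS =====

-- the two loops compute the same state transformation (holds unconditionally)
theorem pvGoA_eq_foldB (index : Int) :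
    ∀ (cs : List Char) (bracks valids : List Int) (k : Int),
      pvGoA cs bracks valids (index + k)
        = ((PySem.List.enumerate cs k).foldl (pvStepB index) (bracks, valids)).2 := by
  intro cs
  induction cs with
  | nil => intro bracks valids k; simp [pvGoA, PySem.List.enumerate_nil]
  | cons c rest ih =>
    intro bracks valids k
    rw [PySem.List.enumerate_cons]
    simp only [List.foldl_cons]
    by_cases hop : c = '('
    · have hs : pvStepB index (bracks, valids) (k, c) = (bracks ++ [index + k], valids) := by
        simp [pvStepB, hop]
      rw [hs]
      have : pvGoA (c :: rest) bracks valids (index + k)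
          = pvGoA rest (bracks ++ [index + k]) valids (index + k + 1) := by
        simp [pvGoA, hop]
      rw [this]
      have := ih (bracks ++ [index + k]) valids (k + 1)
      rw [← this]; ring_nf
    · by_cases hcl : c = ')'
      · by_cases hne : bracks = []
        · subst hne
          have hs : pvStepB index (([] : List Int), valids) (k, c) = ([], valids) := by
            simp [pvStepB, hcl]
          rw [hs]
          have : pvGoA (c :: rest) [] valids (index + k)
              = pvGoA rest [] valids (index + k + 1) := by
            simp [pvGoA, hcl]
          rw [this]
          have := ih ([] : List Int) valids (k + 1)
          rw [← this]; ring_nf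
        · -- nonempty stack, closing bracket
          obtain ⟨pre, last, hpl⟩ := (bracks.eq_nil_or_concat.resolve_left hne)
          rw [List.concat_eq_append] at hpl
          subst hpl
          have hlen : ((pre ++ [last]).length : Int) - 1 = (pre.length : Nat) := by
            simp
          have hopen : PySem.List.pyGetD (pre ++ [last]) (((pre ++ [last]).length : Int) - 1) 0 = last := by
            rw [hlen, PySem.List.pyGetD_natCast]
            simp [List.getD]
          have hslice : PySem.List.slice (pre ++ [last]) none (some (((pre ++ [last]).length : Int) - 1)) = pre := by
            rw [hlen, PySem.List.slice_to_natCast]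
            simp
          have hpop : PySem.List.pop? (pre ++ [last]) (-1) = some (last, pre) := by
            simp [PySem.List.pop?_last]
          have hs : pvStepB index (pre ++ [last], valids) (k, c)
              = (pre, PySem.List.pySetD (PySem.List.pySetD valids last 1) (index + k) 1) := by
            simp only [pvStepB, hcl]
            simp [hpop]
          rw [hs]
          have hA : pvGoA (c :: rest) (pre ++ [last]) valids (index + k)
              = pvGoA rest pre
                  (PySem.List.pySetD (PySem.List.pySetD valids last 1) (index + k) 1)
                  (index + k + 1) := by
            simp only [pvGoA, if_neg hop]
            rw [if_pos (show c = ')' ∧ (pre ++ [last]).length > 0 by exact ⟨hcl, by simp⟩)]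
            simp only [hopen, hslice]
          rw [hA]
          have := ih pre (PySem.List.pySetD (PySem.List.pySetD valids last 1) (index + k) 1) (k + 1)
          rw [← this]; ring_nf
      · have hs : pvStepB index (bracks, valids) (k, c) = (bracks, valids) := by
          simp [pvStepB, hop, hcl]
        rw [hs]
        have : pvGoA (c :: rest) bracks valids (index + k)
            = pvGoA rest bracks valids (index + k + 1) := by
          simp [pvGoA, hop, hcl]
        rw [this]
        have := ih bracks valids (k + 1)
        rw [← this]; ring_nf

-- ===== VERDICT (by name: the statement is the Claim_ definition above) =====
theorem recursizeSolution_spec : Claim_equal_recursizeSolution := by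
  intro s bracks valids index _ _
  unfold Spec_recursizeSolution recursizeSolution recursizeSolution_alt
  have := pvGoA_eq_foldB index s.toList bracks valids 0
  simpa using this
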